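-- pv_equiv track=rewrite | github.com/marastin/HackerRank | Python Examples/string_the_minion_game.py | calc_kevin_points
-- ===== SOURCE A (Python) =====
-- def calc_kevin_points(string: str) -> int:
--     result = 0
--     vowels = "AEIOU"
--     result = 0
--     L = len(string)
--     for idx in range(L):
--         if string[idx] in vowels:
--             result += L - idx
--     return result
-- ===== SOURCE B (Python) =====
-- def calc_kevin_points(string: str) -> int:
--     vowels = 0
--     total = 0
--     for ch in string:
--         if ch in "AEIOU":
--             vowels += 1
--         total += vowels
--     return total
-- ===== Notes on version B (the rewrite author's own statement) =====
-- stated objective: alternative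
-- what changed: B replaces per-vowel index arithmetic (L - idx) by a running prefix count of vowels added at every position, iterating over characters with no indices at all.
import Mathlib
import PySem

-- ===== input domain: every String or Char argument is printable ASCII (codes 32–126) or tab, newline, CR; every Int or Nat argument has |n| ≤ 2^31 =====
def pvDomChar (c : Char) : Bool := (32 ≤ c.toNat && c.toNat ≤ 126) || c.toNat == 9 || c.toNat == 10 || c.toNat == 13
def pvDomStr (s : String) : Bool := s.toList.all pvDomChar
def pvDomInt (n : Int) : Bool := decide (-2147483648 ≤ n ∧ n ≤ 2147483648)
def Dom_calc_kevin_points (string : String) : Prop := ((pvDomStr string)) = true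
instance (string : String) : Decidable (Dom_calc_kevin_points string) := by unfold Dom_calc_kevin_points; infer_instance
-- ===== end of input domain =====

-- B replaces per-vowel index arithmetic (L - idx) by a running prefix count of vowels; same O(L) cost.

-- ===== PORT A =====
def calc_kevin_points (string : String) : Int :=
  let cs := string.toList
  let L : Int := PySem.List.len cs
  (PySem.List.pyRange 0 L 1).foldl
    (fun result idx =>
      if PySem.Chars.isIn [PySem.List.pyGetD cs idx ' '] "AEIOU".toList then result + (L - idx)
      else result) 0

-- ===== PORT B =====
def calc_kevin_points_alt (string : String) : Int :=
  (string.toList.foldl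
    (fun (st : Int × Int) ch =>
      let vowels := if PySem.Chars.isIn [ch] "AEIOU".toList then st.1 + 1 else st.1
      (vowels, st.2 + vowels)) (0, 0)).2

-- ===== PRECONDITION & SPEC =====
def Spec_calc_kevin_points (string : String) (out : Int) : Prop := out = calc_kevin_points_alt string
instance (string : String) (out : Int) : Decidable (Spec_calc_kevin_points string out) := by unfold Spec_calc_kevin_points; infer_instance

-- ===== CLAIM (what is proved, stated in full; the proofs are below) =====
def Claim_equal_calc_kevin_points : Prop := ∀ (string : String), Dom_calc_kevin_points string → Spec_calc_kevin_points string (calc_kevin_points string)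

-- ===== LEMMAS AND PROOFS =====

-- tail contribution of a suffix: each vowel at position k of cs contributes cs.length - k
def pvG (cs : List Char) : Int :=
  match cs with
  | [] => 0
  | c :: rest => (if PySem.Chars.isIn [c] "AEIOU".toList then (rest.length : Int) + 1 else 0) + pvG rest

def pvV (cs : List Char) : Int :=
  (cs.countP (fun c => PySem.Chars.isIn [c] "AEIOU".toList) : Int)

lemma pvB_run (cs : List Char) : ∀ (v t : Int),
    (cs.foldl (fun (st : Int × Int) ch =>
      let vowels := if PySem.Chars.isIn [ch] "AEIOU".toList then st.1 + 1 else st.1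
      (vowels, st.2 + vowels)) (v, t)).2 = t + v * cs.length + pvG cs := by
  induction cs with
  | nil => intro v t; simp [pvG]
  | cons c rest ih =>
    intro v t
    simp only [List.foldl_cons, pvG]
    by_cases h : PySem.Chars.isIn [c] "AEIOU".toList
    · simp only [h, if_true, ih, List.length_cons]
      push_cast; ring
    · simp only [h, ih, List.length_cons]
      push_cast; ring

lemma pvA_enum (L : Int) (cs : List Char) : ∀ (s r : Int),
    ((PySem.List.enumerate cs s).foldl
      (fun r (p : Int × Char) =>
        if PySem.Chars.isIn [p.2] "AEIOU".toList then r + (L - p.1) else r) r)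
    = r + pvG cs + ((L - s) - cs.length) * pvV cs := by
  induction cs with
  | nil => intro s r; simp [pvG, pvV]
  | cons c rest ih =>
    intro s r
    rw [show PySem.List.enumerate (c :: rest) s = (s, c) :: PySem.List.enumerate rest (s + 1) from rfl]
    simp only [List.foldl_cons, pvG]
    by_cases h : PySem.Chars.isIn [c] "AEIOU".toList
    · have hv : pvV (c :: rest) = pvV rest + 1 := by
        simp only [pvV, List.countP_cons, h, if_true]
        push_cast; ring
      simp only [h, if_true, ih, hv, List.length_cons]
      push_cast; ring
    · have hv : pvV (c :: rest) = pvV rest := by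
        simp only [pvV, List.countP_cons, h]
        push_cast; ring
      simp only [h, ih, hv, List.length_cons]
      push_cast; ring

lemma pvA_eq_G (s : String) : calc_kevin_points s = pvG s.toList := by
  have h1 : ((PySem.List.pyRange 0 (PySem.List.len s.toList)).map
        (fun j => (j, PySem.List.pyGetD s.toList j ' '))).foldl
      (fun (r : Int) (p : Int × Char) =>
        if PySem.Chars.isIn [p.2] "AEIOU".toList then r + (PySem.List.len s.toList - p.1) else r) 0
      = (PySem.List.pyRange 0 (PySem.List.len s.toList)).foldl
      (fun (r : Int) (j : Int) =>
        if PySem.Chars.isIn [PySem.List.pyGetD s.toList j ' '] "AEIOU".toList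
        then r + (PySem.List.len s.toList - j) else r) 0 := List.foldl_map
  refine Eq.trans h1.symm ?_
  rw [← PySem.List.enumerate_eq_map_pyRange s.toList ' ', pvA_enum]
  simp [PySem.List.len_eq]

-- ===== VERDICT (by name: the statement is the Claim_ definition above) =====
theorem calc_kevin_points_spec : Claim_equal_calc_kevin_points := by
  intro s _
  unfold Spec_calc_kevin_points
  rw [pvA_eq_G]
  unfold calc_kevin_points_alt
  rw [pvB_run]
  simp
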